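-- pv_equiv track=rewrite | github.com/suryan0800/ProblemSolving | interviewing_io/supersequence.py | build_adjacency_set
-- ===== SOURCE A (Python) =====
-- def build_adjacency_set(arr: list[str]):
--     adjacency_set = {}
--     for s in arr:
--         n = len(s)
--         for i in range(n):
--             ch1 = s[i]
--             if ch1 not in adjacency_set:
--                 adjacency_set[ch1] = set()
--             if (i+1) != n:
--                 ch2 = s[i+1]
--                 adjacency_set[ch1].add(ch2)
--     return adjacency_set
-- ===== SOURCE B (Python) =====
-- def build_adjacency_set(arr: list[str]):
--     chars = dict.fromkeys(ch for s in arr for ch in s)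
--     return {ch: {b for s in arr for a, b in zip(s, s[1:]) if a == ch}
--             for ch in chars}
-- ===== Notes on version B (the rewrite author's own statement) =====
-- stated objective: alternative
-- what changed: Instead of A's single interleaved pass mutating a dict per character, B first collects the distinct characters with dict.fromkeys and then, per distinct character, gathers its successor set by a comprehension scanning all consecutive pairs — a group-by-key formulation with no dict mutation.
import Mathlib
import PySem

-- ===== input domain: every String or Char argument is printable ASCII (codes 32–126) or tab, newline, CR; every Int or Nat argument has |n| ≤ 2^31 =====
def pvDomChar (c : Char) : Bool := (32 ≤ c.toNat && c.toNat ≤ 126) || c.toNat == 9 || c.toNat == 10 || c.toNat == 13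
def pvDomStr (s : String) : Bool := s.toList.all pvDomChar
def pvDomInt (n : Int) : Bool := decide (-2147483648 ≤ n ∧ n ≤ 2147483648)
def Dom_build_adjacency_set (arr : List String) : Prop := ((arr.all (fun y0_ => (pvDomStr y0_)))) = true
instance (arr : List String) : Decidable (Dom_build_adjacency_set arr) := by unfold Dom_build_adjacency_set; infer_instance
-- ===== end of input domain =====

-- B replaces A's single interleaved dict-mutating pass by a group-by-key formulation: first the distinct characters (dict.fromkeys), then per distinct character its successor set gathered from all consecutive pairs; objective: alternative algorithm, no speed claim.


-- ===== PORT A =====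
-- one iteration of A's inner `for i in range(n)` loop; s[i] / s[i+1] via PySem.List.pyGet?
-- (i and i+1 are always in range inside the loop, so the .getD ' ' default is never used — exact)
def pvAstep (cs : List Char) (n : Int) (d : PySem.Dict String (PySem.Set String)) (i : Int) :
    PySem.Dict String (PySem.Set String) :=
  let ch1 : String := String.ofList [((PySem.List.pyGet? cs i).getD ' ')]
  let d' := if d.contains ch1 then d else d.insert ch1 PySem.Set.empty
  if i + 1 ≠ n then
    let ch2 : String := String.ofList [((PySem.List.pyGet? cs (i + 1)).getD ' ')]
    d'.modify ch1 PySem.Set.empty (fun st => PySem.Set.add st ch2)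
  else d'

def build_adjacency_set (arr : List String) : List (String × List String) :=
  (arr.foldl (fun d s =>
      let cs := s.toList
      let n : Int := cs.length
      (PySem.List.pyRange 0 n 1).foldl (pvAstep cs n) d)
    PySem.Dict.empty).items

-- ===== PORT B =====
-- {b for s in arr for a, b in zip(s, s[1:]) if a == ch} : set comprehension = Set.ofList of the
-- generated list; zip(s, s[1:]) with s[1:] = PySem.List.slice toList (some 1) none
def pvSuccs (arr : List String) (c : Char) : PySem.Set String :=
  PySem.Set.ofList (arr.flatMap (fun s =>
    ((s.toList.zip (PySem.List.slice s.toList (some 1) none)).filter (fun p => p.1 == c)).map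
      (fun p => String.ofList [p.2])))

-- dict.fromkeys(ch for s in arr for ch in s) = ordered dedup of the flattened characters
-- (PySem.List.dedup); the final dict comprehension iterates these DISTINCT keys, so its items
-- list is exactly this map
def build_adjacency_set_alt (arr : List String) : List (String × List String) :=
  (PySem.List.dedup (arr.flatMap String.toList)).map
    (fun c => (String.ofList [c], pvSuccs arr c))

-- ===== PRECONDITION & SPEC =====
def Spec_build_adjacency_set (arr : List String) (out : List (String × List String)) : Prop := out = build_adjacency_set_alt arr
instance (arr : List String) (out : List (String × List String)) : Decidable (Spec_build_adjacency_set arr out) := by unfold Spec_build_adjacency_set; infer_instance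

-- ===== CLAIM (what is proved, stated in full; the proofs are below) =====
def Claim_equal_build_adjacency_set : Prop := ∀ (arr : List String), Dom_build_adjacency_set arr → Spec_build_adjacency_set arr (build_adjacency_set arr)

-- ===== LEMMAS AND PROOFS =====

def pvStepT (d : PySem.Dict String (PySem.Set String)) (t : Char × Option Char) :
    PySem.Dict String (PySem.Set String) :=
  let d' := if d.contains (String.ofList [t.1]) then d else d.insert (String.ofList [t.1]) PySem.Set.empty
  match t.2 with
  | some b => d'.modify (String.ofList [t.1]) PySem.Set.empty (fun st => PySem.Set.add st (String.ofList [b]))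
  | none => d'

def pvSuccList (T : List (Char × Option Char)) (c : Char) : List String :=
  (T.filterMap (fun t => if t.1 = c then t.2 else none)).map (fun b => String.ofList [b])

theorem pv_key_inj (c c' : Char) (h : String.ofList [c] = String.ofList [c']) : c = c' := by
  have := congrArg String.toList h; simp at this; exact this

theorem pv_setContains (L : List Char) (x : Char) :
    (PySem.Set.ofList L).contains x = decide (x ∈ L) := by
  show List.contains _ x = _
  simp [PySem.Set.mem_ofList]

theorem pv_dedup_append (L : List Char) (x : Char) :
    PySem.List.dedup (L ++ [x])
      = if x ∈ L then PySem.List.dedup L else PySem.List.dedup L ++ [x] := by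
  show PySem.Set.ofList _ = _
  unfold PySem.Set.ofList
  rw [List.foldl_append]
  show PySem.Set.add (PySem.Set.ofList L) x = _
  unfold PySem.Set.add
  rw [pv_setContains]
  by_cases h : x ∈ L <;> simp [h, PySem.List.dedup, PySem.Set.ofList]

theorem pv_succList_append (T : List (Char × Option Char)) (t : Char × Option Char) (c : Char) :
    pvSuccList (T ++ [t]) c
      = pvSuccList T c ++ if t.1 = c then (t.2.toList.map (fun b => String.ofList [b])) else [] := by
  unfold pvSuccList
  rw [List.filterMap_append, List.map_append]
  congr 1
  by_cases h : t.1 = c <;> simp [h, List.filterMap]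
  cases t.2 <;> simp

theorem pv_succList_notMem (T : List (Char × Option Char)) (c : Char) (h : c ∉ T.map Prod.fst) :
    pvSuccList T c = [] := by
  unfold pvSuccList
  rw [List.filterMap_eq_nil_iff.mpr, List.map_nil]
  intro t ht
  have : t.1 ≠ c := fun hh => h (List.mem_map.mpr ⟨t, ht, hh⟩)
  simp [this]

theorem pv_ofList_append (l : List String) (x : String) :
    PySem.Set.ofList (l ++ [x]) = PySem.Set.add (PySem.Set.ofList l) x := by
  unfold PySem.Set.ofList
  rw [List.foldl_append]; rfl

-- the central lemma
theorem pv_main (T : List (Char × Option Char)) :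
    (T.foldl pvStepT PySem.Dict.empty).items
      = (PySem.List.dedup (T.map Prod.fst)).map
          (fun c => (String.ofList [c], PySem.Set.ofList (pvSuccList T c))) := by
  induction T using List.reverseRecOn with
  | nil => rfl
  | append_singleton T t ih =>
    rw [List.foldl_append, List.foldl_cons, List.foldl_nil, List.map_append]
    set d := T.foldl pvStepT PySem.Dict.empty with hd
    set chars := T.map Prod.fst with hchars
    -- membership in items
    have hmemItems : ∀ c : Char, c ∈ PySem.List.dedup chars →
        (String.ofList [c], PySem.Set.ofList (pvSuccList T c)) ∈ d.items := by
      intro c hc; rw [ih]; exact List.mem_map.mpr ⟨c, hc, rfl⟩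
    -- keys nodup
    have hkeys : d.keys = (PySem.List.dedup chars).map (fun c => String.ofList [c]) := by
      show d.items.map Prod.fst = _
      rw [ih, List.map_map]; rfl
    have hnodup : d.keys.Nodup := by
      rw [hkeys]
      exact (PySem.Set.nodup_ofList chars).map (fun a b h => pv_key_inj a b h)
    -- contains characterisation
    have hcont : ∀ c : Char, d.contains (String.ofList [c]) = decide (c ∈ chars) := by
      intro c
      show d.items.any (fun p => p.1 == String.ofList [c]) = _
      rw [ih, List.any_map]
      have : ((fun p : String × PySem.Set String => p.1 == String.ofList [c]) ∘
          (fun c' => (String.ofList [c'], PySem.Set.ofList (pvSuccList T c'))))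
          = fun c' => c' == c := by
        funext c'
        simp only [Function.comp]
        by_cases h : c' = c
        · simp [h]
        · simp [h]; intro hh; exact h (pv_key_inj _ _ hh)
      rw [this]
      show List.any _ _ = _
      rw [Bool.eq_iff_iff, List.any_eq_true, decide_eq_true_iff]
      constructor
      · rintro ⟨c', hc', hb⟩
        rw [beq_iff_eq] at hb; subst hb
        exact (PySem.Set.mem_ofList chars c').mp hc'
      · intro h
        exact ⟨c, (PySem.Set.mem_ofList chars c).mpr h, beq_self_eq_true c⟩
    -- key freshness helper
    have hfresh : ∀ c : Char, c ∉ chars → d.contains (String.ofList [c]) = false := by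
      intro c hc; rw [hcont]; simp [hc]
    obtain ⟨c0, oc⟩ := t
    simp only [List.map_cons, List.map_nil] at *
    rw [pv_dedup_append]
    by_cases hc0 : c0 ∈ chars
    · -- existing key
      rw [if_pos hc0]
      have hcontT : d.contains (String.ofList [c0]) = true := by rw [hcont]; simp [hc0]
      cases oc with
      | none =>
        show (if d.contains (String.ofList [c0]) = true then d else _).items = _
        rw [if_pos hcontT, ih]
        apply List.map_congr_left
        intro c' _
        rw [pv_succList_append]
        simp
      | some b =>
        show (PySem.Dict.modify (if d.contains (String.ofList [c0]) = true then d else _) _ _ _).items = _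
        rw [if_pos hcontT]
        unfold PySem.Dict.modify
        have hgd : d.getD (String.ofList [c0]) PySem.Set.empty
            = PySem.Set.ofList (pvSuccList T c0) := by
          apply PySem.Dict.getD_of_mem_items d (hmemItems c0 ?_) hnodup
          simp [PySem.List.dedup, PySem.Set.mem_ofList, hc0]
        rw [hgd, PySem.Dict.items_insert_of_contains d _ hcontT, ih, List.map_map]
        apply List.map_congr_left
        intro c' _
        simp only [Function.comp]
        by_cases hcc : c' = c0
        · subst hcc
          rw [if_pos (by simp), pv_succList_append]
          simp [pv_ofList_append]
        · rw [if_neg (by simp; intro hh; exact hcc (pv_key_inj _ _ hh))]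
          rw [pv_succList_append, if_neg (fun hh => hcc hh.symm)]
          simp
    · -- fresh key
      rw [if_neg hc0, List.map_append, List.map_cons, List.map_nil]
      have hcontF : d.contains (String.ofList [c0]) = false := hfresh c0 hc0
      have hitems' : (d.insert (String.ofList [c0]) PySem.Set.empty).items
          = d.items ++ [(String.ofList [c0], PySem.Set.empty)] :=
        PySem.Dict.items_insert_of_not_contains d _ hcontF
      have hsucc0 : pvSuccList T c0 = [] := by
        apply pv_succList_notMem; exact hc0
      cases oc with
      | none =>
        show (if d.contains (String.ofList [c0]) = true then d else _).items = _
        rw [if_neg (by simp [hcontF]), hitems', ih]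
        congr 1
        · apply List.map_congr_left
          intro c' _
          rw [pv_succList_append]; simp
        · rw [pv_succList_append, hsucc0]
          simp [PySem.Set.ofList, PySem.Set.empty]
      | some b =>
        show (PySem.Dict.modify (if d.contains (String.ofList [c0]) = true then d else _) _ _ _).items = _
        rw [if_neg (by simp [hcontF])]
        set d' := d.insert (String.ofList [c0]) PySem.Set.empty with hd'
        have hcont' : d'.contains (String.ofList [c0]) = true :=
          PySem.Dict.contains_insert_self d _ _
        have hnodup' : d'.keys.Nodup := by
          show (d'.items.map Prod.fst).Nodup
          rw [hd', hitems', List.map_append]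
          simp only [List.map_cons, List.map_nil]
          rw [List.nodup_append]
          refine ⟨hnodup, List.nodup_singleton _, ?_⟩
          intro k hk x hx
          rw [List.mem_singleton] at hx
          subst hx
          intro hkk
          subst hkk
          rw [show List.map Prod.fst d.items = d.keys from rfl, hkeys] at hk
          obtain ⟨c', hc', hkey⟩ := List.mem_map.mp hk
          exact hc0 (by
            have := pv_key_inj _ _ hkey
            subst this
            exact (PySem.Set.mem_ofList chars c').mp hc')
        have hgd' : d'.getD (String.ofList [c0]) PySem.Set.empty = PySem.Set.empty := by
          apply PySem.Dict.getD_of_mem_items d' (by rw [hd', hitems']; simp) hnodup'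
        unfold PySem.Dict.modify
        rw [hgd', PySem.Dict.items_insert_of_contains d' _ hcont', hd', hitems',
          List.map_append, ih, List.map_map]
        congr 1
        · apply List.map_congr_left
          intro c' hc'
          simp only [Function.comp]
          rw [if_neg (by
            simp
            intro hh
            exact hc0 ((PySem.Set.mem_ofList chars c0).mp (by rwa [pv_key_inj _ _ hh] at hc')))]
          rw [pv_succList_append, if_neg (by
            intro hh
            apply hc0
            have hcc : c0 = c' := hh
            rw [hcc]
            exact (PySem.Set.mem_ofList chars c').mp hc')]
          simp
        · rw [pv_succList_append, hsucc0]
          simp [PySem.Set.add, PySem.Set.ofList, PySem.Set.empty, PySem.Set.contains]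

def pvTokens (cs : List Char) : List (Char × Option Char) :=
  cs.zip (cs.tail.map some ++ [none])

theorem pv_tokens_cons (c : Char) (cs : List Char) :
    pvTokens (c :: cs) = (c, cs.head?) :: pvTokens cs := by
  cases cs <;> rfl

theorem pv_tokens_fst (cs : List Char) : (pvTokens cs).map Prod.fst = cs := by
  apply List.map_fst_zip
  cases cs <;> simp

def pvInnerA : List Char → PySem.Dict String (PySem.Set String) → PySem.Dict String (PySem.Set String)
  | [], d => d
  | c :: cs, d => pvInnerA cs (pvStepT d (c, cs.head?))

theorem pv_innerA_eq_tokens (cs : List Char) (d : PySem.Dict String (PySem.Set String)) :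
    pvInnerA cs d = (pvTokens cs).foldl pvStepT d := by
  induction cs generalizing d with
  | nil => rfl
  | cons c cs ih => rw [pv_tokens_cons, List.foldl_cons, pvInnerA, ih]

theorem pv_string_succ (cs : List Char) (c : Char) :
    ((pvTokens cs).filterMap (fun t => if t.1 = c then t.2 else none)).map
        (fun b => String.ofList [b])
      = ((cs.zip cs.tail).filter (fun p => p.1 == c)).map (fun p => String.ofList [p.2]) := by
  induction cs with
  | nil => rfl
  | cons c1 cs ih =>
    rw [pv_tokens_cons]
    cases cs with
    | nil => by_cases h : c1 = c <;> simp [pvTokens, h]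
    | cons c2 rest =>
      simp only [List.tail_cons, List.zip_cons_cons, List.filter_cons, List.filterMap_cons]
      by_cases h : c1 = c
      · subst h
        simp only [List.head?_cons, beq_self_eq_true, if_true, List.map_cons]
        simp only [List.tail_cons] at ih
        rw [ih]
      · rw [if_neg h, show (c1 == c) = false from by simp [h]]
        simp only [List.tail_cons] at ih
        simpa using ih

theorem pv_range_loop_eq_innerA (cs : List Char) (d : PySem.Dict String (PySem.Set String)) :
    (PySem.List.pyRange 0 (cs.length : Int) 1).foldl (pvAstep cs (cs.length : Int)) d
      = pvInnerA cs d := by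
  rw [PySem.List.pyRange_zero_natCast, List.foldl_map]
  induction cs generalizing d with
  | nil => rfl
  | cons c cs ih =>
    have hlen : (c :: cs).length = cs.length + 1 := rfl
    rw [hlen, List.range_succ_eq_map, List.foldl_cons, List.foldl_map]
    have hcongr : ∀ (acc : PySem.Dict String (PySem.Set String)), ∀ i ∈ List.range cs.length,
        pvAstep (c :: cs) ((cs.length + 1 : Nat) : Int) acc ((i + 1 : Nat) : Int)
          = pvAstep cs (cs.length : Int) acc (i : Int) := by
      intro acc i hi
      have hilt : i < cs.length := List.mem_range.mp hi
      unfold pvAstep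
      have e1 : PySem.List.pyGet? (c :: cs) ((i + 1 : Nat) : Int) = cs[i]? := by
        rw [PySem.List.pyGet?_natCast]; simp
      have e2 : PySem.List.pyGet? cs ((i : Nat) : Int) = cs[i]? :=
        PySem.List.pyGet?_natCast cs i
      have e3 : ((i + 1 : Nat) : Int) + 1 = ((i + 2 : Nat) : Int) := by push_cast; ring
      have e4 : ((i : Nat) : Int) + 1 = ((i + 1 : Nat) : Int) := by push_cast; ring
      have e5 : PySem.List.pyGet? (c :: cs) ((i + 2 : Nat) : Int) = cs[i+1]? := by
        rw [PySem.List.pyGet?_natCast]; simp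
      have e7 : PySem.List.pyGet? cs ((i + 1 : Nat) : Int) = cs[i+1]? :=
        PySem.List.pyGet?_natCast cs (i + 1)
      have e6 : (((i + 2 : Nat) : Int) ≠ ((cs.length + 1 : Nat) : Int))
          ↔ (((i + 1 : Nat) : Int) ≠ (cs.length : Int)) := by
        constructor <;> (intro h hx; apply h; push_cast at hx ⊢; omega)
      rw [e1, e2, e3, e4, e5, e7]
      simp only [e6]
    rw [PySem.List.foldl_congr_mem _ _ _ _ hcongr, ih]
    -- the peeled index-0 step
    have h0 : pvAstep (c :: cs) ((cs.length + 1 : Nat) : Int) d ((0 : Nat) : Int)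
        = pvStepT d (c, cs.head?) := by
      unfold pvAstep pvStepT
      have g0 : PySem.List.pyGet? (c :: cs) ((0 : Nat) : Int) = some c := by
        rw [PySem.List.pyGet?_natCast]; simp
      cases cs with
      | nil =>
        simp only [g0, List.length_nil]
        rw [if_neg (by norm_num)]
        rfl
      | cons c2 rest =>
        have g1 : PySem.List.pyGet? (c :: c2 :: rest) (((0 : Nat) : Int) + 1) = some c2 := by
          norm_num [PySem.List.pyGet?_natCast (c :: c2 :: rest) 1]
        simp only [g0, g1]
        rw [if_pos (by push_cast [List.length_cons]; omega)]
        simp only [Option.getD_some, List.head?_cons]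
    rw [h0]
    rfl

theorem pv_final (arr : List String) :
    (arr.foldl (fun d s =>
      let cs := s.toList
      let n : Int := cs.length
      (PySem.List.pyRange 0 n 1).foldl (pvAstep cs n) d) PySem.Dict.empty).items
    = (PySem.List.dedup (arr.flatMap String.toList)).map
        (fun c => (String.ofList [c], pvSuccs arr c)) := by
  have h1 : (arr.foldl (fun d s =>
      let cs := s.toList
      let n : Int := cs.length
      (PySem.List.pyRange 0 n 1).foldl (pvAstep cs n) d) PySem.Dict.empty)
      = (arr.flatMap (fun s => pvTokens s.toList)).foldl pvStepT PySem.Dict.empty := by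
    rw [List.foldl_flatMap]
    apply PySem.List.foldl_congr_mem
    intro acc s _
    exact (pv_range_loop_eq_innerA s.toList acc).trans (pv_innerA_eq_tokens s.toList acc)
  rw [h1, pv_main]
  have hfst : (arr.flatMap (fun s => pvTokens s.toList)).map Prod.fst
      = arr.flatMap String.toList := by
    rw [List.map_flatMap]
    congr 1
    funext s
    exact pv_tokens_fst s.toList
  rw [hfst]
  apply List.map_congr_left
  intro c _
  congr 1
  unfold pvSuccs pvSuccList
  congr 1
  rw [List.filterMap_flatMap, List.map_flatMap]
  congr 1
  funext s
  rw [PySem.List.slice_from_one]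
  exact pv_string_succ s.toList c

-- ===== VERDICT (by name: the statement is the Claim_ definition above) =====
theorem build_adjacency_set_spec : Claim_equal_build_adjacency_set := by
  intro arr _
  unfold Spec_build_adjacency_set build_adjacency_set build_adjacency_set_alt
  exact pv_final arr
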